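-- pv_equiv track=rewrite | github.com/VonEquinox/AICodeforcer | src/AICodeforcer/interactive/tools/interactive_stress_test.py | _truncate_interaction_log
-- ===== SOURCE A (Python) =====
-- _LOG_MAX_CHARS = 3500
--
-- def _truncate_interaction_log(log: str, max_chars: int = _LOG_MAX_CHARS) -> str:
--     """智能截断交互日志，保留关键信息。
--
--     策略：
--     1. 优先保留 STDERR 和 INFO 行（错误信息）
--     2. 保留第一轮交互（了解初始状态）
--     3. 保留最后几轮交互（通常是出错的地方）
--     4. 截断过长的单行
--     """
--     if len(log) <= max_chars:
--         return log
--
--     lines = log.splitlines()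
--     original_len = len(log)
--     original_line_count = len(lines)
--
--     # 识别交互轮次：每轮以 [JUDGE -> SOLVER] 开始
--     round_starts = [i for i, line in enumerate(lines) if line.startswith("[JUDGE -> SOLVER]")]
--
--     # 构建轮次范围
--     rounds: list[tuple[int, int]] = []
--     for idx, start in enumerate(round_starts):
--         end = round_starts[idx + 1] if idx + 1 < len(round_starts) else len(lines)
--         rounds.append((start, end))
--
--     # 选择要保留的行
--     keep = [False] * len(lines)
--
--     # 始终保留 STDERR 和 INFO 行
--     for i, line in enumerate(lines):
--         if "STDERR" in line or line.startswith("[INFO]"):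
--             keep[i] = True
--
--     # 保留第一轮和最后几轮
--     if rounds:
--         # 第一轮
--         start, end = rounds[0]
--         for i in range(start, end):
--             keep[i] = True
--         # 最后 3 轮（或更少）
--         for start, end in rounds[-3:]:
--             for i in range(start, end):
--                 keep[i] = True
--     else:
--         # 没有识别到轮次，保留头尾各 20 行
--         for i in range(min(20, len(lines))):
--             keep[i] = True
--         for i in range(max(0, len(lines) - 20), len(lines)):
--             keep[i] = True
--
--     # 构建输出
--     output_lines = [
--         "=== 日志已截断 ===",
--         f"原始: {original_len} 字符, {original_line_count} 行, {len(rounds)} 轮交互",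
--     ]
--     if rounds:
--         output_lines.append(f"保留: 第1轮 + 最后{min(3, len(rounds))}轮 + STDERR/INFO")
--     else:
--         output_lines.append("保留: 头尾各20行 + STDERR/INFO")
--     output_lines.append("")
--
--     prev_idx = -1
--     for i, line in enumerate(lines):
--         if not keep[i]:
--             continue
--         # 显示省略标记
--         if prev_idx >= 0 and i > prev_idx + 1:
--             gap = i - prev_idx - 1
--             output_lines.append(f"... 省略 {gap} 行 ...")
--         # 截断过长的单行
--         if len(line) > 200:
--             line = line[:200] + " ...(行截断)"
--         output_lines.append(line)
--         prev_idx = i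
--
--     result = "\n".join(output_lines)
--
--     # 最终硬截断保护
--     if len(result) > max_chars:
--         marker = "\n...(截断)...\n"
--         # 确保 max_chars 足够容纳 marker
--         if max_chars < len(marker) + 100:
--             return result[:max_chars]
--         head_len = int(max_chars * 0.6)
--         tail_len = max_chars - head_len - len(marker)
--         if tail_len > 0:
--             result = result[:head_len] + marker + result[-tail_len:]
--         else:
--             result = result[:max_chars - len(marker)] + marker.strip()
--
--     return result
-- ===== SOURCE B (Python) =====
-- _LOG_MAX_CHARS = 3500
--
--
-- def _truncate_interaction_log(log: str, max_chars: int = _LOG_MAX_CHARS) -> str: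
--     """Block-walk truncation: the kept region is at most two merged line
--     intervals computed in closed form (first round fused with the last rounds
--     when they touch, or head/tail blocks).  The body is emitted by walking
--     interval-by-interval, scanning only the gaps between them for error lines;
--     lines inside a kept interval are copied without any test."""
--     if len(log) <= max_chars:
--         return log
--
--     lines = log.splitlines()
--     n = len(lines)
--     starts = [i for i, line in enumerate(lines) if line.startswith("[JUDGE -> SOLVER]")]
--     k = len(starts)
--
--     # Merged kept intervals (consecutive rounds are adjacent, so with k <= 4
--     # rounds the first round and the last three fuse into one interval).
--     if k == 0:
--         blocks = [(0, n)] if n <= 40 else [(0, 20), (n - 20, n)]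
--         note = "保留: 头尾各20行 + STDERR/INFO"
--     elif k <= 4:
--         blocks = [(starts[0], n)]
--         note = f"保留: 第1轮 + 最后{min(3, k)}轮 + STDERR/INFO"
--     else:
--         blocks = [(starts[0], starts[1]), (starts[k - 3], n)]
--         note = f"保留: 第1轮 + 最后3轮 + STDERR/INFO"
--
--     out = [
--         "=== 日志已截断 ===",
--         f"原始: {len(log)} 字符, {n} 行, {k} 轮交互",
--         note,
--         "",
--     ]
--     prev = -1
--
--     def emit(i: int) -> None:
--         nonlocal prev
--         if prev >= 0 and i > prev + 1:
--             out.append(f"... 省略 {i - prev - 1} 行 ...")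
--         line = lines[i]
--         out.append(line if len(line) <= 200 else line[:200] + " ...(行截断)")
--         prev = i
--
--     def scan_gap(lo: int, hi: int) -> None:
--         for i in range(lo, hi):
--             if "STDERR" in lines[i] or lines[i].startswith("[INFO]"):
--                 emit(i)
--
--     cur = 0
--     for a, b in blocks:
--         scan_gap(cur, a)
--         for i in range(a, b):
--             emit(i)
--         cur = b
--     scan_gap(cur, n)
--
--     result = "\n".join(out)
--
--     if len(result) > max_chars:
--         marker = "\n...(截断)...\n"
--         if max_chars < len(marker) + 100:
--             return result[:max_chars]
--         head = max_chars * 3 // 5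
--         tail = max_chars - head - len(marker)
--         result = result[:head] + marker + result[-tail:]
--
--     return result
-- ===== Notes on version B (the rewrite author's own statement) =====
-- stated objective: alternative
-- what changed: B never builds A's per-line boolean keep-array or the per-round list: it computes at most two merged kept intervals in closed form (adjacent rounds fuse), then emits block-by-block, scanning only the gaps between intervals for STDERR/[INFO] lines and copying interval lines untested; integer 3//5 arithmetic replaces the float 0.6 head split.
import Mathlib
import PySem

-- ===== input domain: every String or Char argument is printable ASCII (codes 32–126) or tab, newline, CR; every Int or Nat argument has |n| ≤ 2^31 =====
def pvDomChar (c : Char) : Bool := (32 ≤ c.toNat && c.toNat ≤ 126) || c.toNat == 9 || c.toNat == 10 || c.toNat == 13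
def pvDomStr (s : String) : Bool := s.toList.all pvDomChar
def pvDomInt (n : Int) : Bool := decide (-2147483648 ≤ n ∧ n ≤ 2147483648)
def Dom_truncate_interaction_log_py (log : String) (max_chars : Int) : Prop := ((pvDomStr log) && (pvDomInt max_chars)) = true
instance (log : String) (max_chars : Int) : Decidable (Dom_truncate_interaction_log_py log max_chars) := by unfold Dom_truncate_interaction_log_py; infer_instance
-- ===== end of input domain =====

-- B replaces A's round list and per-line boolean keep-array with at most two merged kept
-- intervals computed in closed form; the body is emitted by walking interval-by-interval,
-- scanning only the gaps between them for STDERR/[INFO] lines.  Same exact output.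

-- ===== PORT A =====
-- `for i in range(a, b): keep[i] = True`
def pvMarkRange (ks : List Bool) (a b : Int) : List Bool :=
  (PySem.List.pyRange a b).foldl (fun ks i => PySem.List.pySetD ks i true) ks

-- `end = round_starts[idx + 1] if idx + 1 < len(round_starts) else len(lines)`
def pvRoundEnd (round_starts : List Int) (n idx : Int) : Int :=
  if idx + 1 < PySem.List.len round_starts then PySem.List.pyGetD round_starts (idx + 1) 0 else n

-- the `keep = [False] * len(lines)` block: STDERR/[INFO] pass, then the round / head-tail marking
def pvKeepA (lines : List String) (rounds : List (Int × Int)) (n : Int) : List Bool :=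
  let keep : List Bool := List.replicate lines.length false
  let keep := (PySem.List.enumerate lines).foldl (fun ks p =>
      if PySem.Str.isIn "STDERR" p.2 || PySem.Str.startswith p.2 "[INFO]"
      then PySem.List.pySetD ks p.1 true else ks) keep
  if rounds ≠ [] then
    let se := PySem.List.pyGetD rounds 0 (0, 0)
    (PySem.List.slice rounds (some (-3)) none).foldl (fun ks r => pvMarkRange ks r.1 r.2)
      (pvMarkRange keep se.1 se.2)
  else
    pvMarkRange (pvMarkRange keep 0 (min 20 n)) (max 0 (n - 20)) n

-- the `prev_idx = -1; for i, line in enumerate(lines): ...` output loop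
def pvEmitA (lines : List String) (keep : List Bool) (init : List String × Int) : List String × Int :=
  (PySem.List.enumerate lines).foldl (fun st p =>
      if PySem.List.pyGetD keep p.1 false = false then st else
      let out := if st.2 ≥ 0 ∧ p.1 > st.2 + 1
                 then st.1 ++ ["... 省略 " ++ PySem.Int.toStr (p.1 - st.2 - 1) ++ " 行 ..."]
                 else st.1
      (out ++ [if PySem.Str.len p.2 > 200
               then PySem.Str.slice p.2 none (some 200) ++ " ...(行截断)" else p.2], p.1)) init

-- the final hard-truncation block of A
def pvFinalA (result : String) (max_chars : Int) : String :=
  if PySem.Str.len result > max_chars then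
    let marker := "\n...(截断)...\n"
    if max_chars < PySem.Str.len marker + 100 then PySem.Str.slice result none (some max_chars)
    else
      -- int(max_chars * 0.6) == 3 * max_chars // 5 on the reachable 112 ≤ max_chars ≤ 2^31 (checked against CPython)
      let head_len := PySem.Int.floordiv (3 * max_chars) 5
      let tail_len := max_chars - head_len - PySem.Str.len marker
      if tail_len > 0 then
        PySem.Str.slice result none (some head_len) ++ marker
          ++ PySem.Str.slice result (some (-tail_len)) none
      else
        PySem.Str.slice result none (some (max_chars - PySem.Str.len marker)) ++ PySem.Str.strip marker
  else result

def truncate_interaction_log_py (log : String) (max_chars : Int) : String :=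
  if PySem.Str.len log ≤ max_chars then log else
  let lines := PySem.Str.splitlines log
  let original_len := PySem.Str.len log
  let original_line_count : Int := PySem.List.len lines
  let round_starts : List Int :=
    ((PySem.List.enumerate lines).filter (fun p => PySem.Str.startswith p.2 "[JUDGE -> SOLVER]")).map (·.1)
  let rounds : List (Int × Int) :=
    (PySem.List.enumerate round_starts).foldl
      (fun acc p => acc ++ [(p.2, pvRoundEnd round_starts original_line_count p.1)]) []
  let keep := pvKeepA lines rounds original_line_count
  let output_lines : List String :=
    ["=== 日志已截断 ===",
     "原始: " ++ PySem.Int.toStr original_len ++ " 字符, " ++ PySem.Int.toStr original_line_count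
       ++ " 行, " ++ PySem.Int.toStr (PySem.List.len rounds) ++ " 轮交互"]
  let output_lines := output_lines ++
    (if rounds ≠ [] then
      ["保留: 第1轮 + 最后" ++ PySem.Int.toStr (min 3 (PySem.List.len rounds)) ++ "轮 + STDERR/INFO"]
     else ["保留: 头尾各20行 + STDERR/INFO"])
  let output_lines := output_lines ++ [""]
  let st := pvEmitA lines keep (output_lines, -1)
  let result := PySem.Str.join "\n" st.1
  pvFinalA result max_chars

-- ===== PORT B =====
-- `emit(i)`: gap marker, long-line truncation, prev := i
def pvEmit1 (lines : List String) (st : List String × Int) (i : Int) : List String × Int :=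
  let ps := if st.2 ≥ 0 ∧ i > st.2 + 1
            then st.1 ++ ["... 省略 " ++ PySem.Int.toStr (i - st.2 - 1) ++ " 行 ..."]
            else st.1
  let line := PySem.List.pyGetD lines i ""
  (ps ++ [if PySem.Str.len line ≤ 200 then line
          else PySem.Str.slice line none (some 200) ++ " ...(行截断)"], i)

-- `def scan_gap(lo, hi): for i in range(lo, hi): if STDERR/[INFO]: emit(i)`
def pvScanGap (lines : List String) (lo hi : Int) (st : List String × Int) : List String × Int :=
  (PySem.List.pyRange lo hi).foldl (fun st i =>
    if PySem.Str.isIn "STDERR" (PySem.List.pyGetD lines i "")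
        || PySem.Str.startswith (PySem.List.pyGetD lines i "") "[INFO]"
    then pvEmit1 lines st i else st) st

-- `for i in range(a, b): emit(i)`
def pvEmitBlock (lines : List String) (a b : Int) (st : List String × Int) : List String × Int :=
  (PySem.List.pyRange a b).foldl (pvEmit1 lines) st

-- the final hard-truncation block of B (integer 3//5 split, no dead branch)
def pvFinalB (result : String) (max_chars : Int) : String :=
  if PySem.Str.len result > max_chars then
    let marker := "\n...(截断)...\n"
    if max_chars < PySem.Str.len marker + 100 then PySem.Str.slice result none (some max_chars)
    else
      let head := PySem.Int.floordiv (max_chars * 3) 5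
      let tail := max_chars - head - PySem.Str.len marker
      PySem.Str.slice result none (some head) ++ marker ++ PySem.Str.slice result (some (-tail)) none
  else result

def truncate_interaction_log_py_alt (log : String) (max_chars : Int) : String :=
  if PySem.Str.len log ≤ max_chars then log else
  let lines := PySem.Str.splitlines log
  let n : Int := PySem.List.len lines
  let starts : List Int :=
    ((PySem.List.enumerate lines).filter (fun p => PySem.Str.startswith p.2 "[JUDGE -> SOLVER]")).map (·.1)
  let k : Int := PySem.List.len starts
  let bn : List (Int × Int) × String :=
    if k = 0 then
      ((if n ≤ 40 then [(0, n)] else [(0, 20), (n - 20, n)]), "保留: 头尾各20行 + STDERR/INFO")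
    else if k ≤ 4 then
      ([(PySem.List.pyGetD starts 0 0, n)],
       "保留: 第1轮 + 最后" ++ PySem.Int.toStr (min 3 k) ++ "轮 + STDERR/INFO")
    else
      ([(PySem.List.pyGetD starts 0 0, PySem.List.pyGetD starts 1 0),
        (PySem.List.pyGetD starts (k - 3) 0, n)],
       "保留: 第1轮 + 最后3轮 + STDERR/INFO")
  let out : List String :=
    ["=== 日志已截断 ===",
     "原始: " ++ PySem.Int.toStr (PySem.Str.len log) ++ " 字符, " ++ PySem.Int.toStr n
       ++ " 行, " ++ PySem.Int.toStr k ++ " 轮交互",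
     bn.2, ""]
  let fin := bn.1.foldl (fun (p : (List String × Int) × Int) ab =>
      (pvEmitBlock lines ab.1 ab.2 (pvScanGap lines p.2 ab.1 p.1), ab.2)) ((out, -1), 0)
  let st := pvScanGap lines fin.2 n fin.1
  let result := PySem.Str.join "\n" st.1
  pvFinalB result max_chars

-- ===== PRECONDITION & SPEC =====
def Spec_truncate_interaction_log_py (log : String) (max_chars : Int) (out : String) : Prop := out = truncate_interaction_log_py_alt log max_chars
instance (log : String) (max_chars : Int) (out : String) : Decidable (Spec_truncate_interaction_log_py log max_chars out) := by unfold Spec_truncate_interaction_log_py; infer_instance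

-- ===== CLAIM (what is proved, stated in full; the proofs are below) =====
def Claim_equal_truncate_interaction_log_py : Prop := ∀ (log : String) (max_chars : Int), Dom_truncate_interaction_log_py log max_chars → Spec_truncate_interaction_log_py log max_chars (truncate_interaction_log_py log max_chars)

-- ===== LEMMAS AND PROOFS =====

theorem pv_length_pySetD {α : Type} (ks : List α) (j : Int) (v : α) :
    (PySem.List.pySetD ks j v).length = ks.length := by
  simp [PySem.List.pySetD, PySem.List.pySet?, PySem.List.pyIdx?]
  split_ifs <;> simp

theorem pv_getD_pySetD_true (ks : List Bool) (j : Int) (i : Nat) (hj : 0 ≤ j) (hi : i < ks.length) :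
    (PySem.List.pySetD ks j true).getD i false =
      (if j = (i : Int) then true else ks.getD i false) := by
  simp only [PySem.List.pySetD, PySem.List.pySet?, PySem.List.pyIdx?, if_pos hj]
  split_ifs with h1 h2 h3
  · simp only [Option.map_some, Option.getD_some, List.getD_eq_getElem?_getD, List.getElem?_set]
    have : j.toNat = i := by omega
    simp [this, hi]
  · simp only [Option.map_some, Option.getD_some, List.getD_eq_getElem?_getD, List.getElem?_set]
    have : ¬ j.toNat = i := by omega
    simp [this]
  · omega
  · simp

theorem pv_getD_foldl_pySetD (J : List Int) (ks : List Bool) (i : Nat)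
    (hJ : ∀ j ∈ J, 0 ≤ j) (hi : i < ks.length) :
    (J.foldl (fun ks j => PySem.List.pySetD ks j true) ks).getD i false =
      ((i : Int) ∈ J || ks.getD i false) := by
  induction J generalizing ks with
  | nil => simp
  | cons j J ih =>
    simp only [List.foldl_cons]
    rw [ih _ (fun x hx => hJ x (by simp [hx])) (by rw [pv_length_pySetD]; exact hi)]
    rw [pv_getD_pySetD_true ks j i (hJ j (by simp)) hi]
    by_cases h : j = (i : Int) <;> simp [h, eq_comm]

theorem pv_length_pvMarkRange (ks : List Bool) (a b : Int) :
    (pvMarkRange ks a b).length = ks.length := by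
  unfold pvMarkRange
  induction PySem.List.pyRange a b generalizing ks with
  | nil => rfl
  | cons x xs ih => simp only [List.foldl_cons]; rw [ih, pv_length_pySetD]

theorem pv_getD_pvMarkRange (ks : List Bool) (a b : Int) (i : Nat) (ha : 0 ≤ a) (hi : i < ks.length) :
    (pvMarkRange ks a b).getD i false =
      (decide (a ≤ (i : Int) ∧ (i : Int) < b) || ks.getD i false) := by
  unfold pvMarkRange
  rw [pv_getD_foldl_pySetD _ _ _ (fun j hj => by
        have := PySem.List.mem_pyRange_one.mp hj; omega) hi]
  by_cases h : a ≤ (i : Int) ∧ (i : Int) < b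
  · simp [PySem.List.mem_pyRange_one, h]
  · simp [PySem.List.mem_pyRange_one, h]

theorem pv_getD_foldl_mark (rs : List (Int × Int)) (ks : List Bool) (i : Nat)
    (hrs : ∀ r ∈ rs, 0 ≤ r.1) (hi : i < ks.length) :
    (rs.foldl (fun ks r => pvMarkRange ks r.1 r.2) ks).getD i false =
      (rs.any (fun se => decide (se.1 ≤ (i : Int) ∧ (i : Int) < se.2)) || ks.getD i false) := by
  induction rs generalizing ks with
  | nil => simp
  | cons r rs ih =>
    simp only [List.foldl_cons]
    rw [ih _ (fun x hx => hrs x (by simp [hx])) (by rw [pv_length_pvMarkRange]; exact hi)]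
    rw [pv_getD_pvMarkRange ks r.1 r.2 i (hrs r (by simp)) hi]
    simp [Bool.or_assoc, Bool.or_comm, Bool.or_left_comm]

theorem pv_mem_idx_filter (lines : List String) (q : Int × String → Bool) (i : Nat) (hi : i < lines.length) :
    ((i : Int) ∈ ((PySem.List.enumerate lines).filter q).map (·.1)) ↔ q ((i : Int), lines[i]) = true := by
  simp only [List.mem_map, List.mem_filter, PySem.List.mem_enumerate_iff]
  constructor
  · rintro ⟨p, ⟨⟨k, hk, rfl⟩, hq⟩, hfst⟩
    simp only [zero_add] at hq hfst ⊢
    have : k = i := by exact_mod_cast hfst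
    subst this; exact hq
  · intro h
    exact ⟨((i : Int), lines[i]), ⟨⟨i, hi, by simp⟩, h⟩, rfl⟩

theorem pv_idx_filter_nonneg (lines : List String) (q : Int × String → Bool) :
    ∀ j ∈ ((PySem.List.enumerate lines).filter q).map (·.1), 0 ≤ j := by
  intro j hj
  simp only [List.mem_map, List.mem_filter, PySem.List.mem_enumerate_iff] at hj
  obtain ⟨p, ⟨⟨k, hk, rfl⟩, _⟩, rfl⟩ := hj
  simp

theorem pv_pyGetD_append_left {α : Type} (xs ys : List α) (j : Int) (d : α)
    (h0 : 0 ≤ j) (h1 : j < xs.length) :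
    PySem.List.pyGetD (xs ++ ys) j d = PySem.List.pyGetD xs j d := by
  rw [PySem.List.pyGetD_eq_getElem _ d h0 (by simp; omega),
      PySem.List.pyGetD_eq_getElem _ d h0 (by exact_mod_cast h1)]
  exact List.getElem_append_left (by omega)

theorem pv_getD_append_last (S : List Int) (n : Int) :
    PySem.List.pyGetD (S ++ [n]) (S.length : Int) 0 = n := by
  rw [PySem.List.pyGetD_natCast]
  simp [List.getD_eq_getElem?_getD, List.getElem?_append_right]

theorem pv_rounds_eq (starts : List Int) (n : Int) :
    (PySem.List.enumerate starts).foldl (fun acc p => acc ++ [(p.2, pvRoundEnd starts n p.1)]) [] =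
    (PySem.List.pyRange 0 (PySem.List.len starts)).map
      (fun j => (PySem.List.pyGetD (starts ++ [n]) j 0, PySem.List.pyGetD (starts ++ [n]) (j + 1) 0)) := by
  rw [PySem.List.foldl_append_singleton_eq_map, PySem.List.enumerate_eq_map_pyRange starts 0,
      List.map_map, List.nil_append]
  apply List.map_congr_left
  intro j hj
  have hj' := PySem.List.mem_pyRange_one.mp hj
  have hk : (0:Int) ≤ j ∧ j < starts.length := by
    simpa [PySem.List.len] using hj'
  simp only [Function.comp]
  congr 1
  · exact (pv_pyGetD_append_left starts [n] j 0 hk.1 (by exact_mod_cast hk.2)).symm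
  · unfold pvRoundEnd
    by_cases h : j + 1 < PySem.List.len starts
    · rw [if_pos h, pv_pyGetD_append_left starts [n] (j+1) 0 (by omega)
          (by simp [PySem.List.len] at h; exact_mod_cast h)]
    · rw [if_neg h]
      have hlen : PySem.List.len starts = (starts.length : Int) := rfl
      have hje : j + 1 = (starts.length : Int) := by rw [hlen] at h; omega
      rw [hje, pv_getD_append_last]

theorem pv_drop_pyRange (t : Nat) (a b : Int) :
    (PySem.List.pyRange a b).drop t = PySem.List.pyRange (a + t) b := by
  induction t generalizing a with
  | zero => simp
  | succ t ih =>
    by_cases h : a < b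
    · rw [PySem.List.pyRange_one_cons h]
      simp only [List.drop_succ_cons]
      rw [ih (a + 1)]
      congr 1; omega
    · rw [PySem.List.pyRange_one_eq_nil (by omega), PySem.List.pyRange_one_eq_nil (by omega)]
      simp

theorem pv_slice_neg3 {α : Type} (l : List α) :
    PySem.List.slice l (some (-3)) none = l.drop (l.length - 3) := by
  have h1 : (-3:Int) < 0 := by norm_num
  simp only [PySem.List.slice, PySem.List.clampIdx, if_pos h1]
  split_ifs with h2
  · have : l.length - 3 = 0 := by omega
    simp [this]
  · have ha : ((l.length : Int) + -3).toNat = l.length - 3 := by omega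
    rw [ha]
    apply List.take_of_length_le
    simp

def pvCond (s : String) : Bool :=
  PySem.Str.isIn "STDERR" s || PySem.Str.startswith s "[INFO]"

def pvCoverList (rounds : List (Int × Int)) (n : Int) : List (Int × Int) :=
  if rounds ≠ [] then
    PySem.List.pyGetD rounds 0 (0, 0) :: PySem.List.slice rounds (some (-3)) none
  else [(0, min 20 n), (max 0 (n - 20), n)]

theorem pv_length_foldl_pySetD (J : List Int) (ks : List Bool) :
    (J.foldl (fun ks j => PySem.List.pySetD ks j true) ks).length = ks.length := by
  induction J generalizing ks with
  | nil => rfl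
  | cons j J ih => simp only [List.foldl_cons]; rw [ih, pv_length_pySetD]

theorem pv_foldl_fst (l : List (Int × String)) (ks : List Bool) :
    l.foldl (fun acc x => PySem.List.pySetD acc x.1 true) ks
      = (l.map (·.1)).foldl (fun acc j => PySem.List.pySetD acc j true) ks :=
  by rw [List.foldl_map]

theorem pv_keep1_getD (lines : List String) (i : Nat) (hi : i < lines.length) :
    ((PySem.List.enumerate lines).foldl (fun ks p =>
        if PySem.Str.isIn "STDERR" p.2 || PySem.Str.startswith p.2 "[INFO]"
        then PySem.List.pySetD ks p.1 true else ks) (List.replicate lines.length false)).getD i false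
      = pvCond lines[i] := by
  simp only [PySem.List.foldl_if_eq_foldl_filter]
  rw [pv_foldl_fst]
  rw [pv_getD_foldl_pySetD _ _ _ (pv_idx_filter_nonneg lines _) (by simpa using hi)]
  have hmem := pv_mem_idx_filter lines
      (fun p => PySem.Str.isIn "STDERR" p.2 || PySem.Str.startswith p.2 "[INFO]") i hi
  rw [List.getD_eq_getElem?_getD]
  simp only [List.getElem?_replicate, hi, if_pos, Option.getD_some, Bool.or_false]
  by_cases h : pvCond lines[i] = true
  · have hm : (i:Int) ∈ ((PySem.List.enumerate lines).filter
        (fun p => PySem.Str.isIn "STDERR" p.2 || PySem.Str.startswith p.2 "[INFO]")).map (·.1) :=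
      hmem.mpr h
    rw [h, decide_eq_true_iff]
    exact hm
  · have hm : ¬ ((i:Int) ∈ ((PySem.List.enumerate lines).filter
        (fun p => PySem.Str.isIn "STDERR" p.2 || PySem.Str.startswith p.2 "[INFO]")).map (·.1)) :=
      fun hm => h (hmem.mp hm)
    rw [Bool.not_eq_true] at h
    rw [h, decide_eq_false_iff_not]
    exact hm

theorem pv_keepA_getD (lines : List String) (rounds : List (Int × Int)) (n : Int) (i : Nat)
    (hrs : ∀ r ∈ rounds, 0 ≤ r.1) (_hn : 0 ≤ n) (hi : i < lines.length) :
    (pvKeepA lines rounds n).getD i false =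
      (pvCond lines[i] ||
        (pvCoverList rounds n).any (fun se => decide (se.1 ≤ (i:Int) ∧ (i:Int) < se.2))) := by
  have hlen1 : ((PySem.List.enumerate lines).foldl (fun ks p =>
        if PySem.Str.isIn "STDERR" p.2 || PySem.Str.startswith p.2 "[INFO]"
        then PySem.List.pySetD ks p.1 true else ks) (List.replicate lines.length false)).length
      = lines.length := by
    simp only [PySem.List.foldl_if_eq_foldl_filter]
    rw [pv_foldl_fst, pv_length_foldl_pySetD]
    simp
  unfold pvKeepA pvCoverList
  by_cases hr : rounds ≠ []
  · simp only [hr, if_pos, ne_eq, not_false_eq_true]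
    have h0 : PySem.List.pyGetD rounds 0 (0, 0) ∈ rounds := by
      rcases rounds with _ | ⟨r, rs⟩
      · simp at hr
      · rw [PySem.List.pyGetD_zero_cons]; simp
    have step : ∀ r ∈ (PySem.List.pyGetD rounds 0 (0,0)) :: PySem.List.slice rounds (some (-3)) none,
        0 ≤ r.1 := by
      intro r hrm
      rcases List.mem_cons.mp hrm with h | h
      · exact hrs _ (h ▸ h0)
      · exact hrs _ (by rw [pv_slice_neg3] at h; exact List.mem_of_mem_drop h)
    have := pv_getD_foldl_mark
        ((PySem.List.pyGetD rounds 0 (0,0)) :: PySem.List.slice rounds (some (-3)) none)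
        _ i step (by rw [hlen1]; exact hi)
    simp only [List.foldl_cons] at this
    rw [this, pv_keep1_getD lines i hi, Bool.or_comm]
  · simp only [hr, if_neg, ne_eq, not_true_eq_false, not_false_eq_true, not_not]
    rw [pv_getD_pvMarkRange _ _ _ _ (by omega) (by rw [pv_length_pvMarkRange, hlen1]; exact hi),
        pv_getD_pvMarkRange _ _ _ _ (by omega) (by rw [hlen1]; exact hi),
        pv_keep1_getD lines i hi]
    rw [not_not] at hr
    subst hr
    simp only [List.any_cons, List.any_nil, Bool.or_false]
    ac_rfl

theorem pv_cover_eq (starts : List Int) (n : Int) (h : starts ≠ []) :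
    pvCoverList ((PySem.List.pyRange 0 (PySem.List.len starts)).map
        (fun j => (PySem.List.pyGetD (starts ++ [n]) j 0, PySem.List.pyGetD (starts ++ [n]) (j+1) 0))) n
    = (PySem.List.pyGetD (starts ++ [n]) 0 0, PySem.List.pyGetD (starts ++ [n]) 1 0) ::
      (PySem.List.pyRange (max 0 (PySem.List.len starts - 3)) (PySem.List.len starts)).map
        (fun j => (PySem.List.pyGetD (starts ++ [n]) j 0, PySem.List.pyGetD (starts ++ [n]) (j+1) 0)) := by
  have hk : (0:Int) < PySem.List.len starts := by
    simp only [PySem.List.len]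
    have := List.length_pos_iff.mpr h
    omega
  have hcons := PySem.List.pyRange_one_cons hk
  unfold pvCoverList
  rw [if_pos (by
    intro hnil
    have := congrArg List.length hnil
    simp at this
    exact h this)]
  congr 1
  · rw [hcons]
    simp only [List.map_cons, PySem.List.pyGetD_zero_cons]
    norm_num
  · rw [pv_slice_neg3, List.length_map, PySem.List.length_pyRange_one, ← List.map_drop,
        pv_drop_pyRange]
    congr 2
    simp only [PySem.List.len]
    omega

theorem pv_R_fst_nonneg (starts : List Int) (n : Int)
    (hs : ∀ x ∈ starts, 0 ≤ x) (hn : 0 ≤ n) :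
    ∀ r ∈ (PySem.List.pyRange 0 (PySem.List.len starts)).map
        (fun j => (PySem.List.pyGetD (starts ++ [n]) j 0, PySem.List.pyGetD (starts ++ [n]) (j+1) 0)),
      0 ≤ r.1 := by
  intro r hr
  obtain ⟨j, hj, rfl⟩ := List.mem_map.mp hr
  have hj' := PySem.List.mem_pyRange_one.mp hj
  simp only [PySem.List.len] at hj'
  have hmem : PySem.List.pyGetD (starts ++ [n]) j 0 ∈ starts ++ [n] := by
    apply PySem.List.pyGetD_mem
    simp only [PySem.Raise.InRange]
    constructor <;> simp <;> omega
  rcases List.mem_append.mp hmem with hx | hx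
  · exact hs _ hx
  · simp only [List.mem_singleton] at hx
    simp [hx, hn]

-- emission over an explicit index list
def pvEmitIdx (lines : List String) (idxs : List Int) (st : List String × Int) : List String × Int :=
  idxs.foldl (pvEmit1 lines) st

theorem pv_emitIdx_append (lines : List String) (l1 l2 : List Int) (st : List String × Int) :
    pvEmitIdx lines (l1 ++ l2) st = pvEmitIdx lines l2 (pvEmitIdx lines l1 st) := by
  unfold pvEmitIdx; exact List.foldl_append

theorem pv_scanGap_eq (lines : List String) (lo hi : Int) (st : List String × Int) :
    pvScanGap lines lo hi st =
      pvEmitIdx lines ((PySem.List.pyRange lo hi).filter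
        (fun i => pvCond (PySem.List.pyGetD lines i ""))) st := by
  unfold pvScanGap pvEmitIdx pvCond
  rw [PySem.List.foldl_if_eq_foldl_filter]

theorem pv_emitBlock_eq (lines : List String) (a b : Int) (st : List String × Int) :
    pvEmitBlock lines a b st = pvEmitIdx lines (PySem.List.pyRange a b) st := rfl

-- A's per-line sweep over the keep-array is emission over the kept-index list
theorem pv_emitA_eq_idx (lines : List String) (keep : List Bool) (κ : Int × String → Bool)
    (init : List String × Int)
    (hk : ∀ (i : Nat) (h : i < lines.length), keep.getD i false = κ ((i:Int), lines[i])) :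
    pvEmitA lines keep init
      = pvEmitIdx lines (((PySem.List.enumerate lines).filter κ).map (·.1)) init := by
  unfold pvEmitA pvEmitIdx
  rw [List.foldl_map, ← PySem.List.foldl_if_eq_foldl_filter]
  apply PySem.List.foldl_congr_mem
  intro st p hp
  obtain ⟨k, hklt, rfl⟩ := (PySem.List.mem_enumerate_iff lines 0 p).mp hp
  simp only [zero_add]
  have hkeep : PySem.List.pyGetD keep ((k:Int)) false = κ ((k:Int), lines[k]) := by
    rw [PySem.List.pyGetD_natCast]
    exact hk k hklt
  rw [hkeep]
  by_cases hκ : κ ((k:Int), lines[k]) = true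
  · rw [hκ, if_neg (by simp), if_pos rfl]
    simp only [pvEmit1]
    have hline : PySem.List.pyGetD lines ((k:Int)) "" = lines[k] := by
      rw [PySem.List.pyGetD_eq_getElem _ _ (by omega) (by exact_mod_cast hklt)]
      simp
    rw [hline]
    congr 2
    by_cases hl : PySem.Str.len lines[k] ≤ 200
    · rw [if_pos hl, if_neg (not_lt.mpr hl)]
    · rw [if_neg hl, if_pos (not_le.mp hl)]
  · rw [Bool.not_eq_true] at hκ
    rw [hκ, if_pos rfl, if_neg (by simp)]

-- the kept-index list as a filtered range
theorem pv_idx_eq_filter_range (lines : List String) (κ : Int × String → Bool) :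
    ((PySem.List.enumerate lines).filter κ).map (·.1)
      = (PySem.List.pyRange 0 (PySem.List.len lines)).filter
          (fun j => κ (j, PySem.List.pyGetD lines j "")) := by
  rw [PySem.List.enumerate_eq_map_pyRange lines ""]
  rw [List.filter_map, List.map_map]
  simp [Function.comp_def]

-- filter of a range splits around one fully-kept interval
theorem pv_split1 (P Q : Int → Bool) (n a1 b1 : Int)
    (h1 : 0 ≤ a1) (h2 : a1 ≤ b1) (h3 : b1 ≤ n)
    (hP : ∀ i, 0 ≤ i → i < n → P i = (Q i || decide (a1 ≤ i ∧ i < b1))) :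
    (PySem.List.pyRange 0 n).filter P =
      (PySem.List.pyRange 0 a1).filter Q ++ PySem.List.pyRange a1 b1
        ++ (PySem.List.pyRange b1 n).filter Q := by
  rw [PySem.List.pyRange_one_append 0 a1 n h1 (by omega),
      PySem.List.pyRange_one_append a1 b1 n h2 h3, List.filter_append, List.filter_append]
  have gap : ∀ (lo hi : Int), (∀ i, lo ≤ i → i < hi → 0 ≤ i ∧ i < n ∧ ¬ (a1 ≤ i ∧ i < b1)) →
      (PySem.List.pyRange lo hi).filter P = (PySem.List.pyRange lo hi).filter Q := by
    intro lo hi hout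
    apply List.filter_congr
    intro i hi'
    have := PySem.List.mem_pyRange_one.mp hi'
    obtain ⟨hx, hy, hz⟩ := hout i (by omega) (by omega)
    rw [hP i hx hy]
    simp [hz]
  have full : (PySem.List.pyRange a1 b1).filter P = PySem.List.pyRange a1 b1 := by
    apply List.filter_eq_self.mpr
    intro i hi'
    have := PySem.List.mem_pyRange_one.mp hi'
    rw [hP i (by omega) (by omega)]
    have : (a1 ≤ i ∧ i < b1) := by omega
    simp [this]
  rw [gap 0 a1 (by intro i _ _; omega), gap b1 n (by intro i _ _; omega), full]
  simp [List.append_assoc]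

-- filter of a range splits around two fully-kept intervals
theorem pv_split2 (P Q : Int → Bool) (n a1 b1 a2 b2 : Int)
    (h1 : 0 ≤ a1) (h2 : a1 ≤ b1) (h3 : b1 ≤ a2) (h4 : a2 ≤ b2) (h5 : b2 ≤ n)
    (hP : ∀ i, 0 ≤ i → i < n → P i = (Q i || decide ((a1 ≤ i ∧ i < b1) ∨ (a2 ≤ i ∧ i < b2)))) :
    (PySem.List.pyRange 0 n).filter P =
      (PySem.List.pyRange 0 a1).filter Q ++ PySem.List.pyRange a1 b1
        ++ (PySem.List.pyRange b1 a2).filter Q ++ PySem.List.pyRange a2 b2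
        ++ (PySem.List.pyRange b2 n).filter Q := by
  rw [PySem.List.pyRange_one_append 0 a1 n h1 (by omega),
      PySem.List.pyRange_one_append a1 b1 n h2 (by omega),
      PySem.List.pyRange_one_append b1 a2 n h3 (by omega),
      PySem.List.pyRange_one_append a2 b2 n h4 h5,
      List.filter_append, List.filter_append, List.filter_append, List.filter_append]
  have gap : ∀ (lo hi : Int), 0 ≤ lo → hi ≤ n →
      (∀ i, lo ≤ i → i < hi → ¬ ((a1 ≤ i ∧ i < b1) ∨ (a2 ≤ i ∧ i < b2))) →
      (PySem.List.pyRange lo hi).filter P = (PySem.List.pyRange lo hi).filter Q := by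
    intro lo hi hlo hhi hout
    apply List.filter_congr
    intro i hi'
    have := PySem.List.mem_pyRange_one.mp hi'
    rw [hP i (by omega) (by omega)]
    simp [hout i (by omega) (by omega)]
  have full : ∀ (lo hi : Int), 0 ≤ lo → hi ≤ n →
      (∀ i, lo ≤ i → i < hi → ((a1 ≤ i ∧ i < b1) ∨ (a2 ≤ i ∧ i < b2))) →
      (PySem.List.pyRange lo hi).filter P = PySem.List.pyRange lo hi := by
    intro lo hi hlo hhi hin
    apply List.filter_eq_self.mpr
    intro i hi'
    have := PySem.List.mem_pyRange_one.mp hi'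
    rw [hP i (by omega) (by omega)]
    simp [hin i (by omega) (by omega)]
  rw [gap 0 a1 (by omega) (by omega) (by intro i _ _; omega),
      full a1 b1 (by omega) (by omega) (by intro i hl hr; left; omega),
      gap b1 a2 (by omega) (by omega) (by intro i _ _; omega),
      full a2 b2 (by omega) (by omega) (by intro i hl hr; right; omega),
      gap b2 n (by omega) (by omega) (by intro i _ _; omega)]
  simp [List.append_assoc]

-- round-start indices are strictly increasing and in [0, len lines)
theorem pv_S_pairwise (lines : List String) (q : Int × String → Bool) :
    (((PySem.List.enumerate lines).filter q).map (·.1)).Pairwise (· < ·) := by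
  rw [List.pairwise_map]
  exact (PySem.List.pairwise_lt_enumerate lines 0).filter q

theorem pv_S_lt (lines : List String) (q : Int × String → Bool) :
    ∀ x ∈ ((PySem.List.enumerate lines).filter q).map (·.1), x < (lines.length : Int) := by
  intro x hx
  simp only [List.mem_map, List.mem_filter, PySem.List.mem_enumerate_iff] at hx
  obtain ⟨p, ⟨⟨k, hk, rfl⟩, _⟩, rfl⟩ := hx
  simp; omega

-- monotone lookup in a ≤-sorted list
theorem pv_getD_mono (B : List Int) (h : B.Pairwise (· ≤ ·)) (p q : Int)
    (h0 : 0 ≤ p) (hpq : p ≤ q) (hq : q < (B.length : Int)) :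
    PySem.List.pyGetD B p 0 ≤ PySem.List.pyGetD B q 0 := by
  rw [PySem.List.pyGetD_eq_getElem _ 0 h0 (by omega),
      PySem.List.pyGetD_eq_getElem _ 0 (by omega) hq]
  rcases eq_or_lt_of_le hpq with rfl | hlt
  · exact le_refl _
  · exact (List.pairwise_iff_getElem.mp h) p.toNat q.toNat (by omega) (by omega) (by omega)

-- a union of adjacent index intervals B[j] ≤ i < B[j+1], j ∈ [lo, lo+m), is one interval
theorem pv_union (B : List Int) (hPW : B.Pairwise (· ≤ ·)) (i : Int) (m : Nat) :
    ∀ (lo : Int), 0 ≤ lo → lo + m < (B.length : Int) →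
    ((PySem.List.pyRange lo (lo + m)).any
        (fun j => decide (PySem.List.pyGetD B j 0 ≤ i ∧ i < PySem.List.pyGetD B (j+1) 0)))
      = decide (PySem.List.pyGetD B lo 0 ≤ i ∧ i < PySem.List.pyGetD B (lo + m) 0) := by
  induction m with
  | zero =>
    intro lo h0 _
    rw [show lo + (0:Nat) = lo by push_cast; omega, PySem.List.pyRange_one_eq_nil (le_refl lo)]
    simp
  | succ m ih =>
    intro lo h0 hlen
    have hm : lo + ((m:Int) + 1) = (lo + 1) + (m : Int) := by omega
    have hcast : lo + ((m + 1 : Nat) : Int) = lo + ((m:Int) + 1) := by push_cast; omega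
    rw [hcast, PySem.List.pyRange_one_cons (by omega), List.any_cons]
    rw [hm, ih (lo + 1) (by omega) (by push_cast at hlen ⊢; omega)]
    have hA : PySem.List.pyGetD B lo 0 ≤ PySem.List.pyGetD B (lo + 1) 0 :=
      pv_getD_mono B hPW lo (lo+1) h0 (by omega) (by push_cast at hlen; omega)
    have hB : PySem.List.pyGetD B (lo + 1) 0 ≤ PySem.List.pyGetD B ((lo + 1) + (m:Int)) 0 :=
      pv_getD_mono B hPW (lo+1) ((lo+1)+(m:Int)) (by omega) (by omega) (by push_cast at hlen; omega)
    rw [← Bool.decide_or]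
    apply decide_eq_decide.mpr
    omega

-- the two final hard-truncation blocks agree
theorem pv_final_eq (r : String) (m : Int) : pvFinalA r m = pvFinalB r m := by
  unfold pvFinalA pvFinalB
  by_cases h1 : PySem.Str.len r > m
  · rw [if_pos h1, if_pos h1]
    have hml : PySem.Str.len "\n...(截断)...\n" = 12 := by decide
    simp only [hml]
    by_cases h2 : m < 12 + 100
    · rw [if_pos h2, if_pos h2]
    · rw [if_neg h2, if_neg h2]
      have hde : PySem.Int.floordiv (3 * m) 5 = (3 * m) / 5 :=
        PySem.Int.floordiv_eq_ediv_of_pos (by norm_num)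
      have htail : 0 < m - PySem.Int.floordiv (3 * m) 5 - 12 := by rw [hde]; omega
      rw [if_pos htail, show m * 3 = 3 * m by ring]
  · rw [if_neg h1, if_neg h1]

theorem pv_main (log : String) (max_chars : Int) :
    truncate_interaction_log_py log max_chars = truncate_interaction_log_py_alt log max_chars := by
  unfold truncate_interaction_log_py truncate_interaction_log_py_alt
  by_cases hle : PySem.Str.len log ≤ max_chars
  · simp only [if_pos hle]
  · simp only [if_neg hle]
    rw [pv_final_eq]
    generalize PySem.Str.splitlines log = L
    generalize PySem.Str.len log = olen
    set N : Int := PySem.List.len L with hNdef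
    set S : List Int := ((PySem.List.enumerate L).filter
        (fun p => PySem.Str.startswith p.2 "[JUDGE -> SOLVER]")).map (·.1) with hSdef
    set K : Int := PySem.List.len S with hKdef
    have hNe : N = (L.length : Int) := rfl
    have hKe : K = (S.length : Int) := rfl
    have hN0 : 0 ≤ N := by rw [hNe]; omega
    have hSpw : S.Pairwise (· < ·) := hSdef ▸ pv_S_pairwise L _
    have hSnn : ∀ x ∈ S, 0 ≤ x := hSdef ▸ pv_idx_filter_nonneg L _
    have hSlt : ∀ x ∈ S, x < N := by rw [hNe]; exact hSdef ▸ pv_S_lt L _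
    rw [pv_rounds_eq S N]
    set B : List Int := S ++ [N] with hBdef
    set R : List (Int × Int) := (PySem.List.pyRange 0 K).map
        (fun j => (PySem.List.pyGetD B j 0, PySem.List.pyGetD B (j + 1) 0)) with hRdef
    have hK0 : 0 ≤ K := by rw [hKe]; omega
    have hlenR : PySem.List.len R = K := by
      simp only [hRdef, PySem.List.len, List.length_map, PySem.List.length_pyRange_one]
      omega
    have hBlen : (B.length : Int) = K + 1 := by rw [hBdef, hKe]; simp
    have hPW : B.Pairwise (· ≤ ·) := by
      rw [hBdef]
      apply List.pairwise_append.mpr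
      refine ⟨hSpw.imp le_of_lt, List.pairwise_singleton _ _, ?_⟩
      intro a ha b hb
      simp only [List.mem_singleton] at hb
      subst hb
      exact le_of_lt (hSlt a ha)
    have hRnn : ∀ r ∈ R, 0 ≤ r.1 := by
      rw [hRdef, hBdef, hKdef]
      exact pv_R_fst_nonneg S N hSnn hN0
    have hBK : PySem.List.pyGetD B K 0 = N := by
      rw [hBdef, hKe]; exact pv_getD_append_last S N
    by_cases hk0 : K = 0
    · -- no rounds: head/tail 20-line blocks
      have hSnil : S = [] := by
        have : S.length = 0 := by omega
        exact List.eq_nil_of_length_eq_zero this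
      have hRnil : R = [] := by
        rw [hRdef, hk0, PySem.List.pyRange_one_eq_nil (le_refl 0), List.map_nil]
      rw [hRnil, if_neg (by simp), if_pos hk0]
      have hk : ∀ (i : Nat) (h : i < L.length),
          (pvKeepA L [] N).getD i false =
            (fun p : Int × String => pvCond p.2 ||
              (pvCoverList [] N).any (fun se => decide (se.1 ≤ p.1 ∧ p.1 < se.2))) ((i:Int), L[i]) :=
        fun i h => pv_keepA_getD L [] N i (by simp) hN0 h
      rw [pv_emitA_eq_idx L (pvKeepA L [] N)
            (fun p : Int × String => pvCond p.2 ||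
              (pvCoverList [] N).any (fun se => decide (se.1 ≤ p.1 ∧ p.1 < se.2))) _ hk,
          pv_idx_eq_filter_range, ← hNdef]
      have hcovnil : pvCoverList [] N = [(0, min 20 N), (max 0 (N - 20), N)] := rfl
      by_cases hn40 : N ≤ 40
      · rw [if_pos hn40]
        simp only [List.foldl_cons, List.foldl_nil]
        rw [pv_split1 _ (fun i => pvCond (PySem.List.pyGetD L i "")) N 0 N (le_refl 0) hN0 (le_refl N)
              (by
                intro i h0 hn
                simp only [hcovnil, List.any_cons, List.any_nil, Bool.or_false]
                congr 1
                rw [← Bool.decide_or]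
                apply decide_eq_decide.mpr
                omega)]
        rw [pv_emitIdx_append, pv_emitIdx_append]
        rw [pv_scanGap_eq, pv_scanGap_eq, pv_emitBlock_eq, hk0]
        simp [PySem.List.len]
      · rw [if_neg hn40]
        simp only [List.foldl_cons, List.foldl_nil]
        rw [pv_split2 _ (fun i => pvCond (PySem.List.pyGetD L i "")) N 0 20 (N - 20) N
              (le_refl 0) (by omega) (by omega) (by omega) (le_refl N)
              (by
                intro i h0 hn
                simp only [hcovnil, List.any_cons, List.any_nil, Bool.or_false]
                congr 1
                rw [← Bool.decide_or]
                apply decide_eq_decide.mpr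
                omega)]
        rw [pv_emitIdx_append, pv_emitIdx_append, pv_emitIdx_append, pv_emitIdx_append]
        rw [pv_scanGap_eq, pv_scanGap_eq, pv_scanGap_eq, pv_emitBlock_eq, pv_emitBlock_eq, hk0]
        simp [PySem.List.len]
    · -- at least one round
      have hSne : S ≠ [] := by
        intro h
        apply hk0
        rw [hKe, h]
        rfl
      have hRne : R ≠ [] := by
        intro h
        apply hk0
        rw [← hlenR, h]
        rfl
      have hK1 : 1 ≤ K := by omega
      have hS0 : 0 ≤ PySem.List.pyGetD S 0 0 ∧ PySem.List.pyGetD S 0 0 < N := by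
        have hmem : PySem.List.pyGetD S 0 0 ∈ S := by
          apply PySem.List.pyGetD_mem
          simp only [PySem.Raise.InRange]
          constructor <;> [simp; skip] <;> rw [hKe] at hK1 <;> omega
        exact ⟨hSnn _ hmem, hSlt _ hmem⟩
      have hB0 : PySem.List.pyGetD B 0 0 = PySem.List.pyGetD S 0 0 := by
        rw [hBdef]
        exact pv_pyGetD_append_left S [N] 0 0 (le_refl 0) (by rw [hKe] at hK1; omega)
      have hmono : ∀ p q : Int, 0 ≤ p → p ≤ q → q ≤ K →
          PySem.List.pyGetD B p 0 ≤ PySem.List.pyGetD B q 0 := by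
        intro p q h0 hpq hq
        exact pv_getD_mono B hPW p q h0 hpq (by omega)
      have hU : ∀ lo : Int, 0 ≤ lo → lo ≤ K → ∀ i : Int,
          ((PySem.List.pyRange lo K).any
            (fun j => decide (PySem.List.pyGetD B j 0 ≤ i ∧ i < PySem.List.pyGetD B (j+1) 0)))
          = decide (PySem.List.pyGetD B lo 0 ≤ i ∧ i < PySem.List.pyGetD B K 0) := by
        intro lo h0 hloK i
        have h := pv_union B hPW i (K - lo).toNat lo h0 (by push_cast; omega)
        rw [show lo + ((K - lo).toNat : Int) = K from by omega] at h
        exact h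
      have hcov : ∀ i : Int,
          ((pvCoverList R N).any (fun se => decide (se.1 ≤ i ∧ i < se.2)))
          = (decide (PySem.List.pyGetD B 0 0 ≤ i ∧ i < PySem.List.pyGetD B 1 0)
              || decide (PySem.List.pyGetD B (max 0 (K - 3)) 0 ≤ i ∧ i < N)) := by
        intro i
        rw [hRdef, hBdef, hKdef, pv_cover_eq S N hSne, List.any_cons, List.any_map]
        simp only [Function.comp_def]
        rw [← hKdef, ← hBdef]
        rw [hU (max 0 (K - 3)) (by omega) (by omega) i, hBK]
      rw [if_pos hRne, if_neg hk0, hlenR]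
      have hk : ∀ (i : Nat) (h : i < L.length),
          (pvKeepA L R N).getD i false =
            (fun p : Int × String => pvCond p.2 ||
              (pvCoverList R N).any (fun se => decide (se.1 ≤ p.1 ∧ p.1 < se.2))) ((i:Int), L[i]) :=
        fun i h => pv_keepA_getD L R N i hRnn hN0 h
      rw [pv_emitA_eq_idx L (pvKeepA L R N)
            (fun p : Int × String => pvCond p.2 ||
              (pvCoverList R N).any (fun se => decide (se.1 ≤ p.1 ∧ p.1 < se.2))) _ hk,
          pv_idx_eq_filter_range, ← hNdef]
      by_cases hk4 : K ≤ 4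
      · rw [if_pos hk4]
        simp only [List.foldl_cons, List.foldl_nil]
        rw [pv_split1 _ (fun i => pvCond (PySem.List.pyGetD L i "")) N
              (PySem.List.pyGetD S 0 0) N hS0.1 (by omega) (le_refl N)
              (by
                intro i h0 hn
                simp only [hcov i]
                congr 1
                rw [← hB0, ← Bool.decide_or]
                apply decide_eq_decide.mpr
                have m1 : PySem.List.pyGetD B 0 0 ≤ PySem.List.pyGetD B (max 0 (K - 3)) 0 :=
                  hmono 0 (max 0 (K - 3)) (le_refl 0) (by omega) (by omega)
                have m2 : PySem.List.pyGetD B (max 0 (K - 3)) 0 ≤ PySem.List.pyGetD B 1 0 :=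
                  hmono (max 0 (K - 3)) 1 (by omega) (by omega) (by omega)
                have m3 : PySem.List.pyGetD B 1 0 ≤ PySem.List.pyGetD B K 0 :=
                  hmono 1 K (by omega) (by omega) (le_refl K)
                rw [hBK] at m3
                omega)]
        rw [pv_emitIdx_append, pv_emitIdx_append]
        rw [pv_scanGap_eq, pv_scanGap_eq, pv_emitBlock_eq]
        simp only [List.cons_append, List.nil_append]
      · rw [if_neg hk4]
        have hmax : max 0 (K - 3) = K - 3 := by omega
        have hB1 : PySem.List.pyGetD B 1 0 = PySem.List.pyGetD S 1 0 := by
          rw [hBdef]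
          exact pv_pyGetD_append_left S [N] 1 0 (by omega) (by rw [hKe] at hk4; omega)
        have hBk3 : PySem.List.pyGetD B (K - 3) 0 = PySem.List.pyGetD S (K - 3) 0 := by
          rw [hBdef]
          exact pv_pyGetD_append_left S [N] (K - 3) 0 (by omega) (by rw [hKe] at hk4 ⊢; omega)
        have m1 : PySem.List.pyGetD B 0 0 ≤ PySem.List.pyGetD B 1 0 :=
          hmono 0 1 (le_refl 0) (by omega) (by omega)
        have m2 : PySem.List.pyGetD B 1 0 ≤ PySem.List.pyGetD B (K - 3) 0 :=
          hmono 1 (K - 3) (by omega) (by omega) (by omega)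
        have m3 : PySem.List.pyGetD B (K - 3) 0 ≤ PySem.List.pyGetD B K 0 :=
          hmono (K - 3) K (by omega) (by omega) (le_refl K)
        rw [hBK] at m3
        simp only [List.foldl_cons, List.foldl_nil]
        rw [pv_split2 _ (fun i => pvCond (PySem.List.pyGetD L i "")) N
              (PySem.List.pyGetD S 0 0) (PySem.List.pyGetD S 1 0)
              (PySem.List.pyGetD S (K - 3) 0) N
              hS0.1 (by rw [← hB0, ← hB1]; exact m1) (by rw [← hB1, ← hBk3]; exact m2)
              (by rw [← hBk3]; exact m3) (le_refl N)
              (by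
                intro i h0 hn
                simp only [hcov i, hmax, hB0, hB1, hBk3]
                congr 1
                rw [← Bool.decide_or])]
        rw [pv_emitIdx_append, pv_emitIdx_append, pv_emitIdx_append, pv_emitIdx_append]
        rw [pv_scanGap_eq, pv_scanGap_eq, pv_scanGap_eq, pv_emitBlock_eq, pv_emitBlock_eq]
        simp only [List.cons_append, List.nil_append]
        rw [show min 3 K = 3 from by omega]
        rw [show ("保留: 第1轮 + 最后" ++ PySem.Int.toStr 3 ++ "轮 + STDERR/INFO")
              = "保留: 第1轮 + 最后3轮 + STDERR/INFO" from by decide]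

-- ===== VERDICT (by name: the statement is the Claim_ definition above) =====
theorem truncate_interaction_log_py_spec : Claim_equal_truncate_interaction_log_py := by
  intro log max_chars _
  unfold Spec_truncate_interaction_log_py
  exact pv_main log max_chars
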